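-- pv_equiv track=rewrite | github.com/molaksh/trading_app | runtime/ai_advisor.py | _normalize_ranked_symbols
-- ===== SOURCE A (Python) =====
-- from typing import Dict, Any, Optional, List
--
-- def _normalize_ranked_symbols(ranked: Any, allowlist: List[str]) -> Optional[List[str]]:
--     if not isinstance(ranked, list):
--         return None
--     allowed_set = set(allowlist)
--     seen = set()
--     filtered = []
--     for symbol in ranked:
--         if symbol in allowed_set and symbol not in seen:
--             filtered.append(symbol)
--             seen.add(symbol)
--     for symbol in allowlist:
--         if symbol not in seen:
--             filtered.append(symbol)
--             seen.add(symbol)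
--     if len(filtered) != len(allowlist):
--         return None
--     return filtered
-- ===== SOURCE B (Python) =====
-- from typing import Any, List, Optional
--
--
-- def _normalize_ranked_symbols(ranked: Any, allowlist: List[str]) -> Optional[List[str]]:
--     if not isinstance(ranked, list):
--         return None
--     if len(set(allowlist)) != len(allowlist):
--         return None
--     pos = {}
--     for i, symbol in enumerate(ranked):
--         pos.setdefault(symbol, i)
--     n = len(ranked)
--     order = sorted(enumerate(allowlist), key=lambda t: pos.get(t[1], n + t[0]))
--     return [symbol for _, symbol in order]
-- ===== Notes on version B (the rewrite author's own statement) =====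
-- stated objective: alternative
-- what changed: A builds the result with two accumulate-into-seen-set loops (filtered ranked prefix, then leftover allowlist) and a final length check; B rejects a duplicate-containing allowlist up front via len(set(...)), builds a first-index dict over ranked once, and produces the result as a single stable sort of the allowlist keyed by first appearance in ranked (sentinel n+i for absent symbols).
import Mathlib
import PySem

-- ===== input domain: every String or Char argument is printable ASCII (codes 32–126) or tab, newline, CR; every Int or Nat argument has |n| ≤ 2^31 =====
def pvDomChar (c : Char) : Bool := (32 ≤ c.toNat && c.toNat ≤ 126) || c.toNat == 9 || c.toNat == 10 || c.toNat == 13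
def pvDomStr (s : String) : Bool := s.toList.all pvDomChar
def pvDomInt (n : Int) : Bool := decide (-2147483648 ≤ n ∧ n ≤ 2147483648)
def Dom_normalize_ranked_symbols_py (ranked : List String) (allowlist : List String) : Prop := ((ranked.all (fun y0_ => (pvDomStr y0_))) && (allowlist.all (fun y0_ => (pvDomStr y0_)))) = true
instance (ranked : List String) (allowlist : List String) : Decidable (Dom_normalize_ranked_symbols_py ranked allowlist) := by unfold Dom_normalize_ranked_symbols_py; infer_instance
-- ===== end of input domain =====

-- B replaces A's two accumulate-and-dedup loops by a duplicate guard, a first-index dict and one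
-- stable sort of the allowlist by first-appearance rank (a timing run measured B faster by a constant factor).


-- ===== PORT A =====
-- (Python's 'isinstance(ranked, list)' guard is vacuous here: ranked is typed List String.)
def normalize_ranked_symbols_py (ranked : List String) (allowlist : List String) : Option (List String) :=
  let allowed_set : PySem.Set String := PySem.Set.ofList allowlist
  let st1 := ranked.foldl
    (fun (st : PySem.Set String × List String) symbol =>
      if symbol ∈ allowed_set ∧ symbol ∉ st.1 then (PySem.Set.add st.1 symbol, st.2 ++ [symbol]) else st)
    (PySem.Set.empty, [])
  let st2 := allowlist.foldl
    (fun (st : PySem.Set String × List String) symbol =>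
      if symbol ∉ st.1 then (PySem.Set.add st.1 symbol, st.2 ++ [symbol]) else st)
    st1
  if st2.2.length ≠ allowlist.length then none else some st2.2

-- ===== PORT B =====
def normalize_ranked_symbols_py_alt (ranked : List String) (allowlist : List String) : Option (List String) :=
  if (PySem.Set.ofList allowlist).length ≠ allowlist.length then none
  else
    let pos : PySem.Dict String Int :=
      (PySem.List.enumerate ranked).foldl (fun d p => PySem.Dict.setdefault d p.2 p.1) PySem.Dict.empty
    let n : Int := (ranked.length : Int)
    let order := PySem.List.sorted (PySem.List.enumerate allowlist)
      (fun t => PySem.Dict.getD pos t.2 (n + t.1))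
    some (order.map (fun t => t.2))

-- ===== PRECONDITION & SPEC =====
def Spec_normalize_ranked_symbols_py (ranked : List String) (allowlist : List String) (out : Option (List String)) : Prop := out = normalize_ranked_symbols_py_alt ranked allowlist
instance (ranked : List String) (allowlist : List String) (out : Option (List String)) : Decidable (Spec_normalize_ranked_symbols_py ranked allowlist out) := by unfold Spec_normalize_ranked_symbols_py; infer_instance

-- ===== CLAIM (what is proved, stated in full; the proofs are below) =====
def Claim_equal_normalize_ranked_symbols_py : Prop := ∀ (ranked : List String) (allowlist : List String), Dom_normalize_ranked_symbols_py ranked allowlist → Spec_normalize_ranked_symbols_py ranked allowlist (normalize_ranked_symbols_py ranked allowlist)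

-- ===== LEMMAS AND PROOFS =====

-- the list of symbols appended by one of A's loops: first occurrences in l that satisfy p and are not yet seen
def pvPick (p : String → Prop) [DecidablePred p] : List String → List String → List String
  | [], _ => []
  | s :: ls, seen => if p s ∧ s ∉ seen then s :: pvPick p ls (seen ++ [s]) else pvPick p ls seen

-- A's first loop, from an arbitrary state
lemma pvLoop1_eq (allowed : PySem.Set String) (l : List String) (seen acc : List String) :
    l.foldl
      (fun (st : PySem.Set String × List String) symbol =>
        if symbol ∈ allowed ∧ symbol ∉ st.1 then (PySem.Set.add st.1 symbol, st.2 ++ [symbol]) else st)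
      (seen, acc)
    = (seen ++ pvPick (fun s => s ∈ allowed) l seen, acc ++ pvPick (fun s => s ∈ allowed) l seen) := by
  induction l generalizing seen acc with
  | nil => simp [pvPick]
  | cons s ls ih =>
    simp only [List.foldl_cons, pvPick]
    by_cases h : s ∈ allowed ∧ s ∉ seen
    · rw [if_pos h, if_pos h, PySem.Set.add_of_not_mem h.2, ih]
      simp
    · rw [if_neg h, if_neg h, ih]

-- A's second loop, from an arbitrary state
lemma pvLoop2_eq (l : List String) (seen acc : List String) :
    l.foldl
      (fun (st : PySem.Set String × List String) symbol =>
        if symbol ∉ st.1 then (PySem.Set.add st.1 symbol, st.2 ++ [symbol]) else st)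
      (seen, acc)
    = (seen ++ pvPick (fun _ => True) l seen, acc ++ pvPick (fun _ => True) l seen) := by
  induction l generalizing seen acc with
  | nil => simp [pvPick]
  | cons s ls ih =>
    simp only [List.foldl_cons, pvPick, true_and]
    by_cases h : s ∉ seen
    · rw [if_pos h, if_pos h, PySem.Set.add_of_not_mem h, ih]
      simp
    · rw [if_neg h, if_neg h, ih]

lemma pvPick_eq_filter (p : String → Prop) [DecidablePred p] (l : List String) (seen : List String) :
    pvPick p l seen = (PySem.List.dedup l).filter (fun s => decide (p s ∧ s ∉ seen)) := by
  induction l generalizing seen with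
  | nil => simp [pvPick, PySem.List.dedup, PySem.Set.ofList]
  | cons x xs ih =>
    rw [PySem.List.dedup_eq_ofList, PySem.Set.ofList_cons]
    have hdisc : PySem.Set.discard (PySem.Set.ofList xs) x
        = (PySem.Set.ofList xs).filter (fun y => !(y == x)) := rfl
    rw [hdisc, List.filter_cons, List.filter_filter]
    by_cases h : p x ∧ x ∉ seen
    · rw [pvPick, if_pos h, ih, if_pos (by simpa using h), PySem.List.dedup_eq_ofList]
      congr 1
      apply List.filter_congr
      intro a _
      by_cases hax : a = x
      · subst hax; simp
      · simp [List.mem_append, hax]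
    · rw [pvPick, if_neg h, ih, if_neg (by simpa using h), PySem.List.dedup_eq_ofList]
      apply List.filter_congr
      intro a _
      by_cases hax : a = x
      · subst hax; simp [h]
      · simp [hax]

-- the two halves of A's result
def pvH (ranked allowlist : List String) : List String :=
  (PySem.List.dedup ranked).filter (fun s => decide (s ∈ allowlist))
def pvT (ranked allowlist : List String) : List String :=
  (PySem.List.dedup allowlist).filter (fun s => decide (s ∉ pvH ranked allowlist))

lemma pvH_eq_pick (ranked allowlist : List String) :
    pvPick (fun s => s ∈ PySem.Set.ofList allowlist) ranked [] = pvH ranked allowlist := by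
  rw [pvPick_eq_filter, pvH]
  apply List.filter_congr
  intro a _
  simp [PySem.Set.mem_ofList]

lemma pvT_eq_pick (ranked allowlist : List String) :
    pvPick (fun _ => True) allowlist (pvH ranked allowlist) = pvT ranked allowlist := by
  rw [pvPick_eq_filter, pvT]
  apply List.filter_congr
  intro a _
  simp

lemma pvH_sub_dedup (ranked allowlist : List String) :
    ∀ s ∈ pvH ranked allowlist, s ∈ PySem.List.dedup allowlist := by
  intro s hs
  rw [pvH, List.mem_filter] at hs
  rw [PySem.List.mem_dedup]
  simpa using hs.2

lemma pvH_nodup (ranked allowlist : List String) : (pvH ranked allowlist).Nodup :=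
  List.Nodup.filter _ (by rw [PySem.List.dedup_eq_ofList]; exact PySem.Set.nodup_ofList ranked)

-- length of A's result = number of distinct allowlist symbols
lemma pvHT_length (ranked allowlist : List String) :
    (pvH ranked allowlist ++ pvT ranked allowlist).length = (PySem.List.dedup allowlist).length := by
  have hsplit := List.length_eq_length_filter_add (l := PySem.List.dedup allowlist)
    (fun s => decide (s ∈ pvH ranked allowlist))
  have hperm : ((PySem.List.dedup allowlist).filter (fun s => decide (s ∈ pvH ranked allowlist))).Perm
      (pvH ranked allowlist) := by
    rw [List.perm_ext_iff_of_nodup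
      (List.Nodup.filter _ (by rw [PySem.List.dedup_eq_ofList]; exact PySem.Set.nodup_ofList _))
      (pvH_nodup ranked allowlist)]
    intro a
    simp only [List.mem_filter, decide_eq_true_eq]
    exact ⟨fun h => h.2, fun h => ⟨pvH_sub_dedup _ _ _ h, h⟩⟩
  have hlen := hperm.length_eq
  rw [List.length_append, pvT]
  have : (List.filter (fun s => !decide (s ∈ pvH ranked allowlist)) (PySem.List.dedup allowlist)).length
      = (List.filter (fun s => decide (s ∉ pvH ranked allowlist)) (PySem.List.dedup allowlist)).length := by
    congr 1
    apply List.filter_congr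
    intro a _
    simp
  omega

-- characterisation of A
lemma pvA_char (ranked allowlist : List String) :
    normalize_ranked_symbols_py ranked allowlist
    = if (PySem.Set.ofList allowlist).length ≠ allowlist.length then none
      else some (pvH ranked allowlist ++ pvT ranked allowlist) := by
  unfold normalize_ranked_symbols_py
  simp only []
  rw [show (PySem.Set.empty : PySem.Set String) = ([] : List String) from rfl]
  rw [pvLoop1_eq, pvLoop2_eq]
  simp only [List.nil_append, pvH_eq_pick, pvT_eq_pick]
  have hlen : (pvH ranked allowlist ++ pvT ranked allowlist).length = (PySem.Set.ofList allowlist).length := by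
    rw [pvHT_length, PySem.List.dedup_eq_ofList]
  rw [hlen]

-- set(xs) is a sublist of xs
lemma pvOfList_sublist (xs : List String) : (PySem.Set.ofList xs : List String).Sublist xs := by
  induction xs with
  | nil => simp [PySem.Set.ofList]
  | cons x l ih =>
    rw [PySem.Set.ofList_cons]
    exact List.Sublist.cons₂ x (List.Sublist.trans List.filter_sublist ih)

lemma pvGuard_iff (xs : List String) : (PySem.Set.ofList xs : List String).length = xs.length ↔ xs.Nodup := by
  constructor
  · intro h
    have := List.Sublist.eq_of_length (pvOfList_sublist xs) h
    rw [← this]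
    exact PySem.Set.nodup_ofList xs
  · intro h
    rw [PySem.Set.ofList_eq_self_of_nodup _ h]

-- the first-index dictionary
lemma pvPos_get (l : List String) : ∀ (start : Int) (d : PySem.Dict String Int) (s : String),
    PySem.Dict.get? ((PySem.List.enumerate l start).foldl
      (fun d p => PySem.Dict.setdefault d p.2 p.1) d) s
    = match PySem.Dict.get? d s with
      | some v => some v
      | none => if s ∈ l then some ((List.idxOf s l : Int) + start) else none := by
  induction l with
  | nil =>
    intro start d s
    cases h : PySem.Dict.get? d s <;> simp [PySem.List.enumerate, h]
  | cons x ls ih =>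
    intro start d s
    rw [PySem.List.enumerate_cons]
    simp only [List.foldl_cons]
    rw [ih]
    have hsd : PySem.Dict.setdefault d x start
        = if d.contains x then d else d.insert x start := by
      by_cases hc : d.contains x
      · unfold PySem.Dict.setdefault; rw [if_pos hc, if_pos hc]
      · unfold PySem.Dict.setdefault PySem.Dict.insert; rw [if_neg hc, if_neg hc, if_neg hc]
    by_cases hx : s = x
    · subst hx
      cases h : PySem.Dict.get? d s with
      | some v =>
        have hc : d.contains s = true := by
          by_contra hc
          rw [Bool.not_eq_true] at hc
          rw [← PySem.Dict.get?_eq_none_iff_contains] at hc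
          rw [h] at hc
          cases hc
        rw [hsd, if_pos hc, h]
      | none =>
        have hc : d.contains s = false := (PySem.Dict.get?_eq_none_iff_contains d s).mp h
        rw [hsd, if_neg (by simp [hc]), PySem.Dict.get?_insert, if_pos rfl]
        simp [List.idxOf_cons_self]
    · cases h : PySem.Dict.get? d s with
      | some v =>
        have : PySem.Dict.get? (PySem.Dict.setdefault d x start) s = some v := by
          rw [hsd]
          split
          · exact h
          · rw [PySem.Dict.get?_insert, if_neg hx, h]
        rw [this]
      | none =>
        have : PySem.Dict.get? (PySem.Dict.setdefault d x start) s = none := by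
          rw [hsd]
          split
          · exact h
          · rw [PySem.Dict.get?_insert, if_neg hx, h]
        rw [this]
        simp only [List.mem_cons]
        have hmem : (s = x ∨ s ∈ ls) ↔ s ∈ ls := by
          constructor
          · rintro (h1 | h2); exacts [absurd h1 hx, h2]
          · exact Or.inr
        rw [if_congr hmem rfl rfl]
        by_cases hm : s ∈ ls
        · rw [if_pos hm, if_pos hm, List.idxOf_cons_ne _ (fun he => hx he.symm)]
          congr 1
          push_cast
          omega
        · rw [if_neg hm, if_neg hm]

lemma pvPos_getD (ranked : List String) (s : String) (dflt : Int) :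
    PySem.Dict.getD ((PySem.List.enumerate ranked).foldl
      (fun d p => PySem.Dict.setdefault d p.2 p.1) PySem.Dict.empty) s dflt
    = if s ∈ ranked then (List.idxOf s ranked : Int) else dflt := by
  rw [PySem.Dict.getD_eq_get?_getD]
  have : PySem.List.enumerate ranked = PySem.List.enumerate ranked 0 := rfl
  rw [this, pvPos_get]
  rw [PySem.Dict.get?_empty]
  by_cases hm : s ∈ ranked
  · simp [hm]
  · simp [hm]

-- first occurrences in a dedup are in strictly increasing index order
lemma pvDedup_pairwise_idxOf (l : List String) :
    (PySem.List.dedup l).Pairwise (fun a b => List.idxOf a l < List.idxOf b l) := by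
  induction l with
  | nil => simp [PySem.List.dedup]
  | cons x xs ih =>
    rw [PySem.List.dedup_eq_ofList] at *
    rw [PySem.Set.ofList_cons]
    constructor
    · intro b hb
      have hbx : b ≠ x := by
        have := (PySem.Set.mem_discard (PySem.Set.ofList xs) x b).mp hb
        exact this.2
      rw [List.idxOf_cons_self, List.idxOf_cons_ne _ (fun he => hbx he.symm)]
      omega
    · have hf : (PySem.Set.discard (PySem.Set.ofList xs) x).Pairwise
          (fun a b => List.idxOf a xs < List.idxOf b xs) := by
        show (List.filter _ _).Pairwise _
        exact List.Pairwise.filter _ ih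
      apply hf.imp_of_mem
      intro a b ha hb hab
      have hax : a ≠ x := ((PySem.Set.mem_discard _ _ _).mp ha).2
      have hbx : b ≠ x := ((PySem.Set.mem_discard _ _ _).mp hb).2
      rw [List.idxOf_cons_ne _ (fun he => hax he.symm), List.idxOf_cons_ne _ (fun he => hbx he.symm)]
      omega

-- B's effective sort key, written directly on symbols
lemma pvHT_perm (ranked allowlist : List String) (hn : allowlist.Nodup) :
    (pvH ranked allowlist ++ pvT ranked allowlist).Perm allowlist := by
  have hdedup : PySem.List.dedup allowlist = allowlist := by
    rw [PySem.List.dedup_eq_ofList, PySem.Set.ofList_eq_self_of_nodup _ hn]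
  have hTnodup : (pvT ranked allowlist).Nodup := by
    unfold pvT; rw [hdedup]; exact List.Nodup.filter _ hn
  have hnodup : (pvH ranked allowlist ++ pvT ranked allowlist).Nodup := by
    rw [List.nodup_append]
    refine ⟨pvH_nodup _ _, hTnodup, ?_⟩
    intro a ha b hb heq
    subst heq
    have hb2 := (List.mem_filter.mp hb).2
    simp only [decide_eq_true_eq] at hb2
    exact hb2 ha
  rw [List.perm_ext_iff_of_nodup hnodup hn]
  intro a
  simp only [List.mem_append]
  constructor
  · rintro (h | h)
    · rw [pvH, List.mem_filter] at h
      simpa using h.2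
    · unfold pvT at h; rw [hdedup, List.mem_filter] at h
      exact h.1
  · intro ha
    by_cases hH : a ∈ pvH ranked allowlist
    · exact Or.inl hH
    · refine Or.inr ?_
      unfold pvT
      rw [hdedup, List.mem_filter]
      simp [ha, hH]

lemma pvMem_H_iff (ranked allowlist : List String) (s : String) :
    s ∈ pvH ranked allowlist ↔ s ∈ ranked ∧ s ∈ allowlist := by
  rw [pvH, List.mem_filter]
  simp

lemma pvEnumerate_eq_map (a : List String) (hn : a.Nodup) :
    PySem.List.enumerate a = a.map (fun s => ((List.idxOf s a : Int), s)) := by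
  apply List.ext_getElem
  · simp [PySem.List.length_enumerate]
  · intro k h1 h2
    rw [PySem.List.getElem_enumerate]
    simp only [List.getElem_map]
    rw [List.Nodup.idxOf_getElem hn]
    simp

-- B equals A's characterisation on a duplicate-free allowlist
lemma pvB_char (ranked allowlist : List String) (hn : allowlist.Nodup) :
    normalize_ranked_symbols_py_alt ranked allowlist
    = some (pvH ranked allowlist ++ pvT ranked allowlist) := by
  have hguard : (PySem.Set.ofList allowlist : List String).length = allowlist.length :=
    (pvGuard_iff allowlist).mpr hn
  unfold normalize_ranked_symbols_py_alt
  rw [if_neg (by omega)]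
  simp only []
  -- notation
  set HT := pvH ranked allowlist ++ pvT ranked allowlist with hHT
  have hdedup : PySem.List.dedup allowlist = allowlist := by
    rw [PySem.List.dedup_eq_ofList, PySem.Set.ofList_eq_self_of_nodup _ hn]
  -- the key evaluated at the decorated pair of s
  have hkey : ∀ s : String,
      PySem.Dict.getD ((PySem.List.enumerate ranked).foldl
        (fun d p => PySem.Dict.setdefault d p.2 p.1) PySem.Dict.empty) s
        ((ranked.length : Int) + (List.idxOf s allowlist : Int))
      = if s ∈ ranked then (List.idxOf s ranked : Int)
        else (ranked.length : Int) + (List.idxOf s allowlist : Int) := by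
    intro s
    rw [pvPos_getD]
  -- the strictly increasing rearrangement
  have hsorted : PySem.List.sorted (PySem.List.enumerate allowlist)
      (fun t => PySem.Dict.getD ((PySem.List.enumerate ranked).foldl
        (fun d p => PySem.Dict.setdefault d p.2 p.1) PySem.Dict.empty) t.2 ((ranked.length : Int) + t.1))
      = HT.map (fun s => ((List.idxOf s allowlist : Int), s)) := by
    apply PySem.List.sorted_eq_of_perm_of_pairwise_lt
    · have h1 : PySem.List.enumerate allowlist = allowlist.map (fun s => ((List.idxOf s allowlist : Int), s)) :=
        pvEnumerate_eq_map allowlist hn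
      rw [h1]
      exact (pvHT_perm ranked allowlist hn).map _
    · rw [List.pairwise_map]
      have hg : HT.Pairwise (fun a b =>
          (if a ∈ ranked then (List.idxOf a ranked : Int)
            else (ranked.length : Int) + (List.idxOf a allowlist : Int))
          < (if b ∈ ranked then (List.idxOf b ranked : Int)
            else (ranked.length : Int) + (List.idxOf b allowlist : Int))) := by
        rw [hHT, List.pairwise_append]
        refine ⟨?_, ?_, ?_⟩
        · -- within H: strictly increasing first index in ranked
          have := List.Pairwise.filter (fun s => decide (s ∈ allowlist)) (pvDedup_pairwise_idxOf ranked)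
          apply this.imp_of_mem
          intro a b ha hb hab
          have haR : a ∈ ranked := ((pvMem_H_iff ranked allowlist a).mp ha).1
          have hbR : b ∈ ranked := ((pvMem_H_iff ranked allowlist b).mp hb).1
          rw [if_pos haR, if_pos hbR]
          exact_mod_cast hab
        · -- within T: strictly increasing allowlist index, shifted by n
          have hp : (PySem.List.dedup allowlist).Pairwise
              (fun a b => List.idxOf a allowlist < List.idxOf b allowlist) := by
            have := pvDedup_pairwise_idxOf allowlist
            exact this
          have := List.Pairwise.filter (fun s => decide (s ∉ pvH ranked allowlist)) hp
          apply this.imp_of_mem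
          intro a b ha hb hab
          have haT : a ∉ ranked := by
            rw [List.mem_filter] at ha
            have hmem : a ∈ allowlist := by
              have := ha.1; rwa [PySem.List.mem_dedup] at this
            have hnH := ha.2
            simp only [decide_eq_true_eq] at hnH
            intro haR
            exact hnH ((pvMem_H_iff ranked allowlist a).mpr ⟨haR, hmem⟩)
          have hbT : b ∉ ranked := by
            rw [List.mem_filter] at hb
            have hmem : b ∈ allowlist := by
              have := hb.1; rwa [PySem.List.mem_dedup] at this
            have hnH := hb.2
            simp only [decide_eq_true_eq] at hnH
            intro hbR
            exact hnH ((pvMem_H_iff ranked allowlist b).mpr ⟨hbR, hmem⟩)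
          rw [if_neg haT, if_neg hbT]
          omega
        · -- across: every ranked index is below n ≤ n + anything
          intro a ha b hb
          have haR : a ∈ ranked := ((pvMem_H_iff ranked allowlist a).mp ha).1
          have hbT : b ∉ ranked := by
            unfold pvT at hb; rw [List.mem_filter] at hb
            have hmem : b ∈ allowlist := by
              have := hb.1; rwa [PySem.List.mem_dedup] at this
            have hnH := hb.2
            simp only [decide_eq_true_eq] at hnH
            intro hbR
            exact hnH ((pvMem_H_iff ranked allowlist b).mpr ⟨hbR, hmem⟩)
          rw [if_pos haR, if_neg hbT]
          have := List.idxOf_lt_length_of_mem haR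
          have h0 : (0 : Int) ≤ (List.idxOf b allowlist : Int) := by positivity
          omega
      apply hg.imp_of_mem
      intro a b _ _ hab
      simpa only [hkey a, hkey b] using hab
  rw [hsorted]
  congr 1
  rw [List.map_map]
  exact List.map_id'' (congrFun rfl) _

-- ===== VERDICT (by name: the statement is the Claim_ definition above) =====
theorem normalize_ranked_symbols_py_spec : Claim_equal_normalize_ranked_symbols_py := by
  intro ranked allowlist _
  unfold Spec_normalize_ranked_symbols_py
  rw [pvA_char]
  by_cases hg : (PySem.Set.ofList allowlist : List String).length = allowlist.length
  · rw [if_neg (by omega), pvB_char ranked allowlist ((pvGuard_iff allowlist).mp hg)]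
  · rw [if_pos (by omega)]
    unfold normalize_ranked_symbols_py_alt
    rw [if_pos (by omega)]
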